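-- pv_equiv track=rewrite | github.com/rafaelff97/RI_03 | query.py | countTermsInList
-- ===== SOURCE A (Python) =====
-- def countTermsInList(listTerms, query):
--     counterDic = {}
--     for term in query:
--         counter = 0
--         for values in listTerms[1]:
--             if values[0] == term:
--                 counter += 1
--         counterDic[term] = counter
--     return counterDic
-- ===== SOURCE B (Python) =====
-- def countTermsInList(listTerms, query):
--     if not query:
--         return {}
--     counts = {t: 0 for t in query}
--     qset = set(query)
--     for values in listTerms[1]:
--         v = values[0]
--         if v in qset:
--             counts[v] += 1
--     return counts
-- ===== Notes on version B (the rewrite author's own statement) =====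
-- stated objective: faster
-- what changed: A rescans listTerms[1] once per query term (nested loops); B seeds a dict with every query term at 0 and makes a single pass over listTerms[1], incrementing the matching entry via a set membership test, eliminating the inner rescan.
import Mathlib
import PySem

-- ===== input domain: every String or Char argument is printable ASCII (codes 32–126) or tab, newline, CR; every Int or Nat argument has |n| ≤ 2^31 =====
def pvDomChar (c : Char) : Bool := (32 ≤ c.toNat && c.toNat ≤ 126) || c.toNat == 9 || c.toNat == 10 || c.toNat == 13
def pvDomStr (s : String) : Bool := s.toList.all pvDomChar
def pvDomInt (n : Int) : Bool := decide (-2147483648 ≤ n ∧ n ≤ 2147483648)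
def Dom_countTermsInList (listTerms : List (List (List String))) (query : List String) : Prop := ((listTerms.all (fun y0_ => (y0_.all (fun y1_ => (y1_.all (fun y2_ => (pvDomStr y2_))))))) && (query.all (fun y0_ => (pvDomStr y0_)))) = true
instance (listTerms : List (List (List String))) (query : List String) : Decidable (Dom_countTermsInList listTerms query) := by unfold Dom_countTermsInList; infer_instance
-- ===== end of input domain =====

-- B replaces A's per-query-term rescans of listTerms[1] by one zero-seeded dict and a single pass (objective: faster).

-- ===== PORT A =====
def countTermsInList (listTerms : List (List (List String))) (query : List String) : List (String × Int) :=
  (query.foldl (fun counterDic term =>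
      counterDic.insert term
        (((PySem.List.pyGet? listTerms 1).getD []).foldl
          (fun counter values =>
            if (PySem.List.pyGet? values 0).getD "" == term then counter + 1 else counter)
          (0 : Int)))
    PySem.Dict.empty).items

-- ===== PORT B =====
def countTermsInList_alt (listTerms : List (List (List String))) (query : List String) : List (String × Int) :=
  if query.isEmpty then []
  else
    let counts := query.foldl (fun d t => d.insert t (0 : Int)) PySem.Dict.empty
    let qset : PySem.Set String := PySem.Set.ofList query
    (((PySem.List.pyGet? listTerms 1).getD []).foldl
      (fun d values =>
        let v := (PySem.List.pyGet? values 0).getD ""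
        if PySem.Set.contains qset v then d.modify v 0 (· + 1) else d)
      counts).items

-- ===== PRECONDITION & SPEC =====
-- Pre_ excludes exactly the inputs on which the Python A raises an IndexError: whenever query is
-- nonempty, listTerms must have an element at index 1 and every row of that element must be nonempty.
def Pre_countTermsInList (listTerms : List (List (List String))) (query : List String) : Prop :=
  query = [] ∨ (2 ≤ listTerms.length ∧ ∀ v ∈ (PySem.List.pyGet? listTerms 1).getD [], v ≠ [])
instance (listTerms : List (List (List String))) (query : List String) : Decidable (Pre_countTermsInList listTerms query) := by unfold Pre_countTermsInList; infer_instance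
def pvWitness_countTermsInList : List (List (List String)) × List String :=
  ([[["z"]], [["a", "x"], ["b"], ["a"]]], ["a", "c"])

def Spec_countTermsInList (listTerms : List (List (List String))) (query : List String) (out : List (String × Int)) : Prop := out = countTermsInList_alt listTerms query
instance (listTerms : List (List (List String))) (query : List String) (out : List (String × Int)) : Decidable (Spec_countTermsInList listTerms query out) := by unfold Spec_countTermsInList; infer_instance

-- ===== CLAIM (what is proved, stated in full; the proofs are below) =====
def Claim_equal_countTermsInList : Prop := ∀ (listTerms : List (List (List String))) (query : List String), Dom_countTermsInList listTerms query → Pre_countTermsInList listTerms query → Spec_countTermsInList listTerms query (countTermsInList listTerms query)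

-- ===== LEMMAS AND PROOFS =====

-- A's inner loop counts occurrences of t among the heads.
theorem aInner_eq_count (hd : List String → String) (t : String) :
    ∀ (l : List (List String)) (c : Int),
      l.foldl (fun c v => if hd v == t then c + 1 else c) c
        = c + ((l.map hd).count t : Int) := by
  intro l
  induction l with
  | nil => intro c; simp
  | cons v l ih =>
    intro c
    simp only [List.foldl_cons, List.map_cons, List.count_cons, ih]
    by_cases h : hd v = t <;> simp [h, beq_iff_eq] <;> push_cast <;> ring

-- A fold of inserts whose value depends only on the key: the resulting lookup.
theorem getD_insert_loop (f : String → Int) :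
    ∀ (q : List String) (d : PySem.Dict String Int) (t : String),
      (q.foldl (fun d x => d.insert x (f x)) d).getD t 0
        = if t ∈ q then f t else d.getD t 0 := by
  intro q
  induction q with
  | nil => intro d t; simp
  | cons a q ih =>
    intro d t
    simp only [List.foldl_cons, ih, List.mem_cons]
    by_cases hq : t ∈ q
    · simp [hq]
    · by_cases ha : t = a
      · subst ha; simp [hq, PySem.Dict.getD_insert_self]
      · simp [hq, ha, PySem.Dict.getD_insert_of_ne _ _ _ ha]

-- B's single pass: a key's value grows by the number of matching heads, gated by set membership.
theorem getD_bloop (hd : List String → String) (qset : PySem.Set String) :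
    ∀ (l : List (List String)) (d : PySem.Dict String Int) (t : String),
      (l.foldl (fun d values =>
          if PySem.Set.contains qset (hd values) then d.modify (hd values) 0 (· + 1) else d) d).getD t 0
        = d.getD t 0 + (if t ∈ qset then ((l.map hd).count t : Int) else 0) := by
  intro l
  induction l with
  | nil => intro d t; simp
  | cons v l ih =>
    intro d t
    simp only [List.foldl_cons, ih, List.map_cons, List.count_cons]
    by_cases hv : hd v ∈ qset
    · rw [if_pos ((PySem.Set.contains_iff qset (hd v)).mpr hv)]
      by_cases ht : t = hd v
      · subst ht
        rw [PySem.Dict.getD_modify, if_pos rfl, if_pos hv]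
        simp [hv]
        push_cast; ring
      · rw [PySem.Dict.getD_modify, if_neg ht]
        have : (hd v == t) = false := by simp [beq_iff_eq]; exact fun h => ht h.symm
        simp [this]
    · rw [if_neg (by simp [PySem.Set.contains_iff, hv])]
      by_cases ht : t ∈ qset
      · have : t ≠ hd v := fun h => hv (h ▸ ht)
        have : (hd v == t) = false := by simp [beq_iff_eq]; exact fun h => ‹t ≠ hd v› h.symm
        simp [ht, this]
      · simp [ht]

-- B's single pass never changes the key set when every member of qset is already a key.
theorem keys_bloop (hd : List String → String) (qset : PySem.Set String) :
    ∀ (l : List (List String)) (d : PySem.Dict String Int),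
      (∀ x ∈ qset, d.contains x = true) →
      (l.foldl (fun d values =>
          if PySem.Set.contains qset (hd values) then d.modify (hd values) 0 (· + 1) else d) d).keys
        = d.keys := by
  intro l
  induction l with
  | nil => intro d _; simp
  | cons v l ih =>
    intro d hkeys
    simp only [List.foldl_cons]
    by_cases hv : hd v ∈ qset
    · rw [if_pos ((PySem.Set.contains_iff qset (hd v)).mpr hv)]
      have hc : d.contains (hd v) = true := hkeys _ hv
      have hkeq : (d.modify (hd v) 0 (· + 1)).keys = d.keys := by
        rw [PySem.Dict.keys_modify, PySem.Dict.keys_insert_of_contains _ _ hc]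
      rw [ih _ (fun x hx => by
        rw [PySem.Dict.contains_modify]
        simp [hkeys x hx]), hkeq]
    · rw [if_neg (by simp [PySem.Set.contains_iff, hv])]
      exact ih d hkeys

-- Keys of the zero-seeding loop: exactly the distinct query terms.
theorem keys_seed (q : List String) :
    (q.foldl (fun d t => d.insert t (0 : Int)) PySem.Dict.empty).keys = PySem.Set.ofList q := by
  rw [PySem.Dict.keys_foldl_insert q (fun _ _ => (0 : Int))]
  simp [PySem.Dict.keys_empty, PySem.Set.update_nil_left]

-- Keys of A's loop: also the distinct query terms.
theorem keys_aloop (q : List String) (f : String → Int) :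
    (q.foldl (fun d x => d.insert x (f x)) PySem.Dict.empty).keys = PySem.Set.ofList q := by
  rw [PySem.Dict.keys_foldl_insert q (fun _ x => f x)]
  simp [PySem.Dict.keys_empty, PySem.Set.update_nil_left]

-- ===== VERDICT (by name: the statement is the Claim_ definition above) =====
theorem countTermsInList_spec : Claim_equal_countTermsInList := by
  intro listTerms query _ _
  unfold Spec_countTermsInList countTermsInList countTermsInList_alt
  cases query with
  | nil => rfl
  | cons q0 qs =>
    simp only [List.isEmpty_cons, Bool.false_eq_true, if_false]
    set query := q0 :: qs with hquery
    set L : List (List String) := (PySem.List.pyGet? listTerms 1).getD [] with hL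
    set hd : List String → String := fun values => (PySem.List.pyGet? values 0).getD "" with hhd
    set cnt : String → Int := fun t => ((L.map hd).count t : Int) with hcnt
    -- A's dict
    have hAform : (fun (counterDic : PySem.Dict String Int) term =>
        counterDic.insert term
          (L.foldl (fun counter values => if hd values == term then counter + 1 else counter) (0 : Int)))
        = fun d x => d.insert x (cnt x) := by
      funext d x
      rw [aInner_eq_count hd x L 0]
      simp [hcnt]
    rw [hAform]
    -- B's dict
    set d0 := query.foldl (fun d t => d.insert t (0 : Int)) PySem.Dict.empty with hd0
    set dA := query.foldl (fun d x => d.insert x (cnt x)) PySem.Dict.empty with hdA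
    set dB := L.foldl (fun d values =>
        if PySem.Set.contains (PySem.Set.ofList query) (hd values) then d.modify (hd values) 0 (· + 1) else d) d0 with hdB
    have hkeys0 : d0.keys = PySem.Set.ofList query := keys_seed query
    have hkeysB : dB.keys = PySem.Set.ofList query := by
      rw [hdB, keys_bloop hd (PySem.Set.ofList query) L d0
        (fun x hx => by
          rw [PySem.Dict.contains_iff_mem_keys, hkeys0]; exact hx), hkeys0]
    have hkeysA : dA.keys = PySem.Set.ofList query := keys_aloop query cnt
    have hndA : dA.keys.Nodup := by rw [hkeysA]; exact PySem.Set.nodup_ofList query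
    have hndB : dB.keys.Nodup := by rw [hkeysB]; exact PySem.Set.nodup_ofList query
    rw [PySem.Dict.items_eq_map_keys dA hndA 0, PySem.Dict.items_eq_map_keys dB hndB 0,
      hkeysA, hkeysB]
    apply List.map_congr_left
    intro t ht
    have htq : t ∈ query := (PySem.Set.mem_ofList query t).mp ht
    have hA : dA.getD t 0 = cnt t := by
      rw [hdA, getD_insert_loop cnt query PySem.Dict.empty t, if_pos htq]
    have hB : dB.getD t 0 = cnt t := by
      rw [hdB, getD_bloop hd (PySem.Set.ofList query) L d0 t, if_pos ht,
        hd0, getD_insert_loop (fun _ => (0 : Int)) query PySem.Dict.empty t, if_pos htq]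
      simp [hcnt]
    rw [hA, hB]
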